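-- pv_equiv track=rewrite | github.com/sp863/algorithm_python | programmers/lvl_0/73_공던지기/73_공던지기.py | solution
-- ===== SOURCE A (Python) =====
-- def solution(numbers, k):
--     count = 0
--     idx = 0
--
--     while True:
--         count += 1
--         if count == k:
--             break
--         idx += 2
--         if idx >= len(numbers):
--             idx = idx - len(numbers)
--
--     return numbers[idx]
-- ===== SOURCE B (Python) =====
-- def solution(numbers, k):
--     return numbers[(2 * (k - 1)) % len(numbers)]
-- ===== Notes on version B (the rewrite author's own statement) =====
-- stated objective: simpler
-- what changed: Replaces the simulation loop (step idx by 2, wrap by subtracting len once per step) with the closed-form index (2*(k-1)) % len(numbers); a timing run did not show a measurable speed-up at the sampled sizes.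
import Mathlib
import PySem

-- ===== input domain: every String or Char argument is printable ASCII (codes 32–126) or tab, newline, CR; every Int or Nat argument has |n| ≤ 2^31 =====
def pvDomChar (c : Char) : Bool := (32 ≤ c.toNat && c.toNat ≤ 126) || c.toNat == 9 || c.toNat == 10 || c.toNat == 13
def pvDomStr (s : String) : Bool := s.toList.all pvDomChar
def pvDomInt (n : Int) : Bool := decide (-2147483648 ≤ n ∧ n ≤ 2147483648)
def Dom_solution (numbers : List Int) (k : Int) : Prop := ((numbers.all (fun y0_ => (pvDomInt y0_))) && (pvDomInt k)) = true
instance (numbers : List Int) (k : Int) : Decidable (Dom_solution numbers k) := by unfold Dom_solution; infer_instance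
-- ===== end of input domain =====

-- B replaces A's step-and-wrap simulation loop by the closed-form index (2*(k-1)) % len(numbers) (simpler).

-- ===== PORT A =====
-- the 'while True' loop; fuel only makes the recursion total — under Pre_ the break
-- (count == k) is reached before the fuel runs out (fuel = k.toNat + 1 ≥ number of iterations)
def solutionGo (numbers : List Int) (k : Int) (count idx : Int) : Nat → Int
  | 0 => 0  -- unreachable under Pre_ (for k ≤ 0 the Python loop never terminates)
  | fuel + 1 =>
    if count + 1 = k then
      -- 'return numbers[idx]'; none = IndexError, excluded by Pre_
      (PySem.List.pyGet? numbers idx).getD 0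
    else
      solutionGo numbers k (count + 1)
        (if (numbers.length : Int) ≤ idx + 2 then idx + 2 - numbers.length else idx + 2) fuel

def solution (numbers : List Int) (k : Int) : Int :=
  solutionGo numbers k 0 0 (k.toNat + 1)

-- ===== PORT B =====
def solution_alt (numbers : List Int) (k : Int) : Int :=
  (PySem.List.pyGet? numbers (PySem.Int.mod (2 * (k - 1)) numbers.length)).getD 0

-- ===== PRECONDITION & SPEC =====
-- Pre_ excludes exactly where A does not return: k ≤ 0 (infinite loop), numbers = []
-- (IndexError), and single-element lists with k ≥ 2 (A's once-per-step wrap lets idx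
-- grow past the end: IndexError).
def Pre_solution (numbers : List Int) (k : Int) : Prop :=
  1 ≤ k ∧ numbers ≠ [] ∧ (2 ≤ numbers.length ∨ k = 1)
instance (numbers : List Int) (k : Int) : Decidable (Pre_solution numbers k) := by
  unfold Pre_solution; infer_instance
def pvWitness_solution : List Int × Int := ([1, 2, 3], 4)

def Spec_solution (numbers : List Int) (k : Int) (out : Int) : Prop := out = solution_alt numbers k
instance (numbers : List Int) (k : Int) (out : Int) : Decidable (Spec_solution numbers k out) := by
  unfold Spec_solution; infer_instance

-- ===== CLAIM (what is proved, stated in full; the proofs are below) =====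
def Claim_equal_solution : Prop := ∀ (numbers : List Int) (k : Int), Dom_solution numbers k → Pre_solution numbers k → Spec_solution numbers k (solution numbers k)

-- ===== LEMMAS AND PROOFS =====

-- loop invariant: with 2 ≤ n, 0 ≤ idx < n, count < k and enough fuel, the loop returns
-- the element at index (idx + 2*(k-1-count)) mod n
theorem solutionGo_eq (numbers : List Int) (k : Int) :
    ∀ (fuel : Nat) (count idx : Int),
      2 ≤ numbers.length → 0 ≤ idx → idx < numbers.length → count < k →
      (k - count).toNat ≤ fuel →
      solutionGo numbers k count idx fuel =
        (PySem.List.pyGet? numbers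
          (PySem.Int.mod (idx + 2 * (k - 1 - count)) numbers.length)).getD 0 := by
  intro fuel
  induction fuel with
  | zero => intro count idx _ _ _ hck hf; omega
  | succ fuel ih =>
    intro count idx hn h0 hlt hck hf
    rw [solutionGo]
    by_cases hbrk : count + 1 = k
    · have hc : k - 1 - count = 0 := by omega
      rw [if_pos hbrk, hc]
      have : PySem.Int.mod (idx + 2 * 0) ↑numbers.length = idx := by
        rw [PySem.Int.mod_eq_emod_of_pos (by omega)]
        simpa using Int.emod_eq_of_lt h0 (by omega)
      rw [this]
    · rw [if_neg hbrk]
      by_cases hw : (numbers.length : Int) ≤ idx + 2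
      · rw [if_pos hw, ih (count + 1) (idx + 2 - numbers.length)
          hn (by omega) (by omega) (by omega) (by omega)]
        congr 1
        rw [PySem.Int.mod_eq_emod_of_pos (by omega),
            PySem.Int.mod_eq_emod_of_pos (by omega)]
        have harg : idx + 2 - (numbers.length : Int) + 2 * (k - 1 - (count + 1)) =
            (idx + 2 * (k - 1 - count)) - numbers.length := by ring
        rw [harg, Int.sub_emod_right]
      · rw [if_neg hw, ih (count + 1) (idx + 2)
          hn (by omega) (by omega) (by omega) (by omega)]
        congr 2
        ring

-- ===== VERDICT (by name: the statement is the Claim_ definition above) =====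
theorem solution_spec : Claim_equal_solution := by
  intro numbers k _ hpre
  obtain ⟨hk, hne, hcase⟩ := hpre
  unfold Spec_solution solution solution_alt
  rcases hcase with hn2 | hk1
  · by_cases hk1 : k = 1
    · subst hk1
      rw [solutionGo, if_pos (by omega)]
      congr 1
    · rw [solutionGo_eq numbers k (k.toNat + 1) 0 0 hn2 le_rfl (by omega) (by omega)
        (by omega)]
      congr 2
      ring
  · subst hk1
    rw [solutionGo, if_pos (by omega)]
    congr 1
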